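-- pv_equiv track=rewrite | github.com/Kornil17/interview_preparing | algoritms/decision_methods/meets_in_the_middle/happy_tickets.py | happy_tickets
-- ===== SOURCE A (Python) =====
-- from collections import defaultdict
-- from collections import defaultdict
--
-- def happy_tickets(n):
--     sum_freq1 = defaultdict(int)
--     sum_freq2 = defaultdict(int)
--
--     for a in range(10):
--         for b in range(10):
--             sum_freq1[a + b] += 1
--
--     for c in range(10):
--         for d in range(10):
--             sum_freq2[n - c - d] += 1
--
--     counter = 0
--     for key in sum_freq1:
--         counter += sum_freq1[key] * sum_freq2[key]
--
--     return counter ** 2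
-- ===== SOURCE B (Python) =====
-- def pair_count(m):
--     # number of digit pairs (x, y), 0 <= x, y <= 9, with x + y == m (closed form)
--     if 0 <= m <= 18:
--         return 10 - abs(m - 9)
--     return 0
--
-- def happy_tickets(n):
--     counter = 0
--     for a in range(10):
--         for b in range(10):
--             counter += pair_count(n - a - b)
--     return counter ** 2
-- ===== Notes on version B (the rewrite author's own statement) =====
-- stated objective: simpler
-- what changed: Replaces the two defaultdict frequency tables and their key-wise product convolution by a single double loop that adds a closed-form count of digit pairs summing to n-a-b, so no dictionaries are built or scanned.
import Mathlib
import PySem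

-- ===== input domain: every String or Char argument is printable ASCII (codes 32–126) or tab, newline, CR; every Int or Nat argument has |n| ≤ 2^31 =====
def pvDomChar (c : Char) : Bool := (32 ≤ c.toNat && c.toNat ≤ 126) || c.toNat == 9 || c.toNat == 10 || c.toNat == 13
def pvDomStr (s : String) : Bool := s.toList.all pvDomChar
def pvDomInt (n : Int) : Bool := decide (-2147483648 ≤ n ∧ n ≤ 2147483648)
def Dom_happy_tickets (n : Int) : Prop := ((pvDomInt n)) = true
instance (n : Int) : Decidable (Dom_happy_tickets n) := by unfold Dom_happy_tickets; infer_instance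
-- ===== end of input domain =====

-- B replaces A's two defaultdict frequency tables and their key-wise product sum by one
-- double loop adding a closed-form pair count (objective: simpler; no dictionaries).


-- ===== PORT A =====
-- sum_freq1: for a in range(10): for b in range(10): sum_freq1[a+b] += 1
def pvSumFreq1 : PySem.Dict Int Int :=
  (PySem.List.pyRange 0 10 1).foldl (fun d a =>
    (PySem.List.pyRange 0 10 1).foldl (fun d b => d.modify (a + b) 0 (· + 1)) d)
    PySem.Dict.empty

-- sum_freq2: for c in range(10): for d in range(10): sum_freq2[n-c-d] += 1
def pvSumFreq2 (n : Int) : PySem.Dict Int Int :=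
  (PySem.List.pyRange 0 10 1).foldl (fun d c =>
    (PySem.List.pyRange 0 10 1).foldl (fun d dd => d.modify (n - c - dd) 0 (· + 1)) d)
    PySem.Dict.empty

def happy_tickets (n : Int) : Int :=
  let sum_freq1 := pvSumFreq1
  let sum_freq2 := pvSumFreq2 n
  -- for key in sum_freq1: counter += sum_freq1[key] * sum_freq2[key]
  let counter := sum_freq1.keys.foldl
    (fun counter key => counter + sum_freq1.getD key 0 * sum_freq2.getD key 0) 0
  counter ^ 2

-- ===== PORT B =====
def pvPairCount (m : Int) : Int := if 0 ≤ m ∧ m ≤ 18 then 10 - |m - 9| else 0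

def happy_tickets_alt (n : Int) : Int :=
  let counter := (PySem.List.pyRange 0 10 1).foldl (fun counter a =>
    (PySem.List.pyRange 0 10 1).foldl (fun counter b => counter + pvPairCount (n - a - b)) counter) 0
  counter ^ 2

-- ===== PRECONDITION & SPEC =====
def Spec_happy_tickets (n : Int) (out : Int) : Prop := out = happy_tickets_alt n
instance (n : Int) (out : Int) : Decidable (Spec_happy_tickets n out) := by unfold Spec_happy_tickets; infer_instance

-- ===== CLAIM (what is proved, stated in full; the proofs are below) =====
def Claim_equal_happy_tickets : Prop := ∀ (n : Int), Dom_happy_tickets n → Spec_happy_tickets n (happy_tickets n)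

-- ===== LEMMAS AND PROOFS =====

-- all pair sums a+b, a,b in range(10)
def pvLsum : List Int :=
  (PySem.List.pyRange 0 10 1).flatMap (fun a => (PySem.List.pyRange 0 10 1).map (fun b => a + b))

-- pvPairCount m is the number of occurrences of m among the pair sums
set_option maxHeartbeats 2000000 in
theorem pvPairCount_eq_count (m : Int) : pvPairCount m = (pvLsum.count m : Int) := by
  by_cases h : 0 ≤ m ∧ m ≤ 18
  · obtain ⟨h1, h2⟩ := h
    interval_cases m <;> decide
  · have hnot : m ∉ pvLsum := by
      intro hm
      simp [pvLsum, List.mem_flatMap, PySem.List.mem_pyRange_one] at hm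
      obtain ⟨a, ⟨ha1, ha2⟩, b, ⟨hb1, hb2⟩, hab⟩ := hm
      omega
    rw [List.count_eq_zero.mpr hnot]
    simp [pvPairCount, h]

-- sum_freq1 is the counter of pvLsum
theorem pvSumFreq1_eq : pvSumFreq1 = PySem.Dict.counter pvLsum := by
  rw [pvSumFreq1, PySem.Dict.counter_eq_foldl, pvLsum, List.foldl_flatMap]
  simp [List.foldl_map]

-- sum_freq2 is the counter of the pair sums reflected through n
theorem pvSumFreq2_eq (n : Int) : pvSumFreq2 n = PySem.Dict.counter (pvLsum.map (fun s => n - s)) := by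
  rw [pvSumFreq2, PySem.Dict.counter_eq_foldl, pvLsum, List.map_flatMap, List.foldl_flatMap]
  apply PySem.List.foldl_congr_mem
  intro acc a _
  rw [List.map_map, List.foldl_map]
  apply PySem.List.foldl_congr_mem
  intro acc2 b _
  have : n - a - b = n - (a + b) := by omega
  simp only [Function.comp_apply]
  rw [this]

theorem pvFreq2_getD (n k : Int) : (pvSumFreq2 n).getD k 0 = pvPairCount (n - k) := by
  rw [pvSumFreq2_eq, PySem.Dict.getD_counter]
  have : (pvLsum.map (fun s => n - s)).count k = pvLsum.count (n - k) := by
    have hinj : Function.Injective (fun s : Int => n - s) := by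
      intro x y h; simp only at h; omega
    have := List.count_map_of_injective pvLsum (fun s : Int => n - s) hinj (n - k)
    simpa using this
  rw [this, ← pvPairCount_eq_count]

theorem pvFreq1_getD (k : Int) : pvSumFreq1.getD k 0 = pvPairCount k := by
  rw [pvSumFreq1_eq, PySem.Dict.getD_counter, ← pvPairCount_eq_count]

set_option maxRecDepth 8192 in
set_option maxHeartbeats 2000000 in
theorem pvFreq1_keys : pvSumFreq1.keys =
    [0, 1, 2, 3, 4, 5, 6, 7, 8, 9, 10, 11, 12, 13, 14, 15, 16, 17, 18] := by decide

-- A's counter, rewritten through the lemmas above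
theorem counterA_eq (n : Int) :
    pvSumFreq1.keys.foldl
      (fun counter key => counter + pvSumFreq1.getD key 0 * (pvSumFreq2 n).getD key 0) 0 =
    ([0, 1, 2, 3, 4, 5, 6, 7, 8, 9, 10, 11, 12, 13, 14, 15, 16, 17, 18].map
      (fun k => pvPairCount k * pvPairCount (n - k))).sum := by
  rw [pvFreq1_keys]
  have := PySem.List.foldl_add
    (l := [(0:Int), 1, 2, 3, 4, 5, 6, 7, 8, 9, 10, 11, 12, 13, 14, 15, 16, 17, 18])
    (g := fun k => pvSumFreq1.getD k 0 * (pvSumFreq2 n).getD k 0) (a := 0)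
  rw [this]
  simp only [pvFreq1_getD, pvFreq2_getD, zero_add]

-- B's counter as a sum over the pair sums
theorem counterB_eq (n : Int) :
    (PySem.List.pyRange 0 10 1).foldl (fun counter a =>
      (PySem.List.pyRange 0 10 1).foldl (fun counter b => counter + pvPairCount (n - a - b)) counter) 0 =
    (pvLsum.map (fun s => pvPairCount (n - s))).sum := by
  have h1 : ∀ (c a : Int), (PySem.List.pyRange 0 10 1).foldl
      (fun counter b => counter + pvPairCount (n - a - b)) c =
      c + ((PySem.List.pyRange 0 10 1).map (fun b => pvPairCount (n - (a + b)))).sum := by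
    intro c a
    rw [PySem.List.foldl_add (g := fun b => pvPairCount (n - a - b))]
    refine congrArg (c + ·) (congrArg List.sum (List.map_congr_left ?_))
    intro b _
    have : n - a - b = n - (a + b) := by omega
    rw [this]
  calc (PySem.List.pyRange 0 10 1).foldl (fun counter a =>
      (PySem.List.pyRange 0 10 1).foldl (fun counter b => counter + pvPairCount (n - a - b)) counter) 0
      = (PySem.List.pyRange 0 10 1).foldl (fun counter a =>
          counter + ((PySem.List.pyRange 0 10 1).map (fun b => pvPairCount (n - (a + b)))).sum) 0 := by
        apply PySem.List.foldl_congr_mem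
        intro c a _
        exact h1 c a
    _ = (pvLsum.map (fun s => pvPairCount (n - s))).sum := by
        rw [PySem.List.foldl_add (g := fun a => ((PySem.List.pyRange 0 10 1).map (fun b => pvPairCount (n - (a + b)))).sum)]
        rw [pvLsum, List.map_flatMap, List.flatMap_def, List.sum_flatten]
        simp only [List.map_map, Function.comp_def, zero_add]

-- ===== VERDICT (by name: the statement is the Claim_ definition above) =====
theorem happy_tickets_spec : Claim_equal_happy_tickets := by
  intro n _
  unfold Spec_happy_tickets
  simp only [happy_tickets, happy_tickets_alt]
  rw [counterA_eq, counterB_eq]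
  have hL : pvLsum = ([0, 1, 2, 3, 4, 5, 6, 7, 8, 9, 1, 2, 3, 4, 5, 6, 7, 8, 9, 10, 2, 3, 4, 5, 6, 7, 8, 9, 10, 11, 3, 4, 5, 6, 7, 8, 9, 10, 11, 12, 4, 5, 6, 7, 8, 9, 10, 11, 12, 13, 5, 6, 7, 8, 9, 10, 11, 12, 13, 14, 6, 7, 8, 9, 10, 11, 12, 13, 14, 15, 7, 8, 9, 10, 11, 12, 13, 14, 15, 16, 8, 9, 10, 11, 12, 13, 14, 15, 16, 17, 9, 10, 11, 12, 13, 14, 15, 16, 17, 18] : List Int) := by decide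
  congr 1
  rw [hL]
  have hP0 : pvPairCount 0 = 1 := by decide
  have hP1 : pvPairCount 1 = 2 := by decide
  have hP2 : pvPairCount 2 = 3 := by decide
  have hP3 : pvPairCount 3 = 4 := by decide
  have hP4 : pvPairCount 4 = 5 := by decide
  have hP5 : pvPairCount 5 = 6 := by decide
  have hP6 : pvPairCount 6 = 7 := by decide
  have hP7 : pvPairCount 7 = 8 := by decide
  have hP8 : pvPairCount 8 = 9 := by decide
  have hP9 : pvPairCount 9 = 10 := by decide
  have hP10 : pvPairCount 10 = 9 := by decide
  have hP11 : pvPairCount 11 = 8 := by decide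
  have hP12 : pvPairCount 12 = 7 := by decide
  have hP13 : pvPairCount 13 = 6 := by decide
  have hP14 : pvPairCount 14 = 5 := by decide
  have hP15 : pvPairCount 15 = 4 := by decide
  have hP16 : pvPairCount 16 = 3 := by decide
  have hP17 : pvPairCount 17 = 2 := by decide
  have hP18 : pvPairCount 18 = 1 := by decide
  simp only [List.map_cons, List.map_nil, List.sum_cons, List.sum_nil, hP0, hP1, hP2, hP3, hP4, hP5, hP6, hP7, hP8, hP9, hP10, hP11, hP12, hP13, hP14, hP15, hP16, hP17, hP18]
  ring
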